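-- pv_equiv track=rewrite | github.com/ABnumbuf/EdMod_Teacher | My_Knapsack.py | knapSack_out
-- ===== SOURCE A (Python) =====
-- def knapSack_loop_out(W, S, result, text):
--     n = len(W)
--     if n == 0:
--         text.append(f'Решение: {result}\n')
--         res = "".join(text)
--         return res
--     if (W[n-1] <= S):
--         result[n-1] = 1
--         S = S - W[n-1]
--         text.append(f'w_{n-1} = {W[n-1]} <= S = {S}\n')
--     else:
--         result[n-1] = 0
--         text.append(f'w_{n-1} = {W[n-1]} > S = {S}\n')
--     text.append(f'x_{n-1} = {result[n-1]}\n')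
--     w = []
--     for i in range(n-1): w.append(W[i])
--     return knapSack_loop_out(w, S, result, text)
--
-- def knapSack_out(W, S):
--     text = []
--     text.append(f'Задача о рюкзаке:\n')
--     n = len(W)
--     for i in range(n - 1):
--         text.append(f' {W[i]}*x_{i} +')
--     text.append(f'{W[n-1]}*x_{n-1} = {S}\n')
--     result = [0 for i in range(n)]
--     return knapSack_loop_out(W, S, result, text)
-- ===== SOURCE B (Python) =====
-- def knapSack_out(W, S):
--     n = len(W)
--     out = 'Задача о рюкзаке:\n'
--     for i in range(n - 1):
--         out += f' {W[i]}*x_{i} +'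
--     out += f'{W[n-1]}*x_{n-1} = {S}\n'
--     result = [0] * n
--     for i in range(n - 1, -1, -1):
--         if W[i] <= S:
--             result[i] = 1
--             S -= W[i]
--             out += f'w_{i} = {W[i]} <= S = {S}\nx_{i} = {result[i]}\n'
--         else:
--             out += f'w_{i} = {W[i]} > S = {S}\nx_{i} = {result[i]}\n'
--     out += f'Решение: {result}\n'
--     return out
-- ===== Notes on version B (the rewrite author's own statement) =====
-- stated objective: faster
-- what changed: Replaces A's recursion, which copies the whole prefix of W element-by-element at every step, with a single backward index loop over the unchanged W accumulating the output string directly.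
import Mathlib
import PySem

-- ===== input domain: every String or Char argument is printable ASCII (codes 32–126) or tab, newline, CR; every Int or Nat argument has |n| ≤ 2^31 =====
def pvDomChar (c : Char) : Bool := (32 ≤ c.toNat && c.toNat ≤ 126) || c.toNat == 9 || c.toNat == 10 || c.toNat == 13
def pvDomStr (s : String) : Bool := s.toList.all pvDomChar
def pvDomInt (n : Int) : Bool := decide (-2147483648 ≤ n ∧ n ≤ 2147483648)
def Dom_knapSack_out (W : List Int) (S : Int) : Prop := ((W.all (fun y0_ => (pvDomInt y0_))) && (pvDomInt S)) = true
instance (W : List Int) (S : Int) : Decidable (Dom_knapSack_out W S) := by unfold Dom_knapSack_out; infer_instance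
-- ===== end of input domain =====

-- B replaces A's recursion (which copies the whole prefix of W at each step) by one backward
-- index loop over the unchanged W that accumulates the output string directly: O(n) vs O(n^2).
-- Both ports work on List Char (strings assembled exactly as the Pythons assemble them).

-- ===== PORT A =====
-- str(i) for a loop index / str(n) for an int, as a char list
def istr (i : Nat) : List Char := PySem.Int.toChars (i : Int)

-- Python's str(list_of_ints): "[a, b, c]"
def reprIntList (l : List Int) : List Char :=
  ['['] ++ PySem.Chars.join (", ".toList) (l.map PySem.Int.toChars) ++ [']']

-- knapSack_loop_out: text is the list of appended chunks; "".join(text) = String.mk text.flatten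
def knapSackLoop (W : List Int) (S : Int) (result : List Int) (text : List (List Char)) : String :=
  let n := W.length
  if _h : n = 0 then
    let text := text ++ ["Решение: ".toList ++ reprIntList result ++ ['\n']]
    String.mk text.flatten
  else
    let wn := W.getD (n-1) 0
    if wn ≤ S then
      let result := result.set (n-1) 1
      let S := S - wn
      let text := text ++ ["w_".toList ++ istr (n-1) ++ " = ".toList ++
        PySem.Int.toChars wn ++ " <= S = ".toList ++ PySem.Int.toChars S ++ ['\n']]
      let text := text ++ ["x_".toList ++ istr (n-1) ++ " = ".toList ++
        PySem.Int.toChars (result.getD (n-1) 0) ++ ['\n']]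
      knapSackLoop (W.take (n-1)) S result text
    else
      let result := result.set (n-1) 0
      let text := text ++ ["w_".toList ++ istr (n-1) ++ " = ".toList ++
        PySem.Int.toChars wn ++ " > S = ".toList ++ PySem.Int.toChars S ++ ['\n']]
      let text := text ++ ["x_".toList ++ istr (n-1) ++ " = ".toList ++
        PySem.Int.toChars (result.getD (n-1) 0) ++ ['\n']]
      knapSackLoop (W.take (n-1)) S result text
termination_by W.length
decreasing_by all_goals (simp [List.length_take]; omega)

def knapSack_out (W : List Int) (S : Int) : String :=
  let text : List (List Char) := ["Задача о рюкзаке:\n".toList]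
  let n := W.length
  let text := (List.range (n-1)).foldl
    (fun t i => t ++ [" ".toList ++ PySem.Int.toChars (W.getD i 0) ++ "*x_".toList ++ istr i ++ " +".toList]) text
  let text := text ++ [PySem.Int.toChars (W.getD (n-1) 0) ++ "*x_".toList ++ istr (n-1) ++
    " = ".toList ++ PySem.Int.toChars S ++ ['\n']]
  knapSackLoop W S (List.replicate n (0 : Int)) text

-- ===== PORT B =====
-- the backward for-loop `for i in range(k-1, -1, -1)` as a countdown on k; out is the string so far
def altLoop (W : List Int) (k : Nat) (S : Int) (result : List Int) (out : List Char) : String :=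
  match k with
  | 0 => String.mk (out ++ "Решение: ".toList ++ reprIntList result ++ ['\n'])
  | Nat.succ i =>
    let wi := W.getD i 0
    if wi ≤ S then
      let result := result.set i 1
      altLoop W i (S - wi) result
        (out ++ "w_".toList ++ istr i ++ " = ".toList ++ PySem.Int.toChars wi ++
         " <= S = ".toList ++ PySem.Int.toChars (S - wi) ++ ['\n'] ++
         "x_".toList ++ istr i ++ " = ".toList ++ PySem.Int.toChars (result.getD i 0) ++ ['\n'])
    else
      altLoop W i S result
        (out ++ "w_".toList ++ istr i ++ " = ".toList ++ PySem.Int.toChars wi ++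
         " > S = ".toList ++ PySem.Int.toChars S ++ ['\n'] ++
         "x_".toList ++ istr i ++ " = ".toList ++ PySem.Int.toChars (result.getD i 0) ++ ['\n'])

def knapSack_out_alt (W : List Int) (S : Int) : String :=
  let n := W.length
  let out := (List.range (n-1)).foldl
    (fun a i => a ++ (" ".toList ++ PySem.Int.toChars (W.getD i 0) ++ "*x_".toList ++ istr i ++ " +".toList))
    "Задача о рюкзаке:\n".toList
  let out := out ++ PySem.Int.toChars (W.getD (n-1) 0) ++ "*x_".toList ++ istr (n-1) ++
    " = ".toList ++ PySem.Int.toChars S ++ ['\n']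
  altLoop W n S (List.replicate n (0 : Int)) out

-- ===== PRECONDITION & SPEC =====
-- Pre_ excludes only the empty list, on which Python A raises IndexError (W[-1]).
def Pre_knapSack_out (W : List Int) (S : Int) : Prop := W ≠ []
instance (W : List Int) (S : Int) : Decidable (Pre_knapSack_out W S) := by unfold Pre_knapSack_out; infer_instance
def pvWitness_knapSack_out : List Int × Int := ([3, -2, 5], 4)

def Spec_knapSack_out (W : List Int) (S : Int) (out : String) : Prop := out = knapSack_out_alt W S
instance (W : List Int) (S : Int) (out : String) : Decidable (Spec_knapSack_out W S out) := by unfold Spec_knapSack_out; infer_instance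

-- ===== CLAIM (what is proved, stated in full; the proofs are below) =====
def Claim_equal_knapSack_out : Prop := ∀ (W : List Int) (S : Int), Dom_knapSack_out W S → Pre_knapSack_out W S → Spec_knapSack_out W S (knapSack_out W S)

-- ===== LEMMAS AND PROOFS =====

-- A's recursion on the k-element prefix of W computes exactly B's countdown loop from k,
-- with the accumulated text flattened into B's string accumulator.
-- a List.set with 0 at a position already holding 0 (or out of range) is the identity
theorem set_zero_self (r : List Int) (i : Nat) (h : r[i]?.getD 0 = 0) : r.set i 0 = r := by
  apply List.ext_getElem?
  intro j
  rw [List.getElem?_set]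
  split
  · rename_i hij
    subst hij
    by_cases hlt : i < r.length
    · rw [List.getElem?_eq_getElem hlt] at h ⊢
      simp at h
      simp [hlt, h]
    · simp [hlt]
  · rfl

-- A's recursion on the k-element prefix of W computes exactly B's countdown loop from k,
-- provided the first k result slots still hold the initial zeros.
theorem knapSackLoop_eq_altLoop (k : Nat) : ∀ (W : List Int) (S : Int) (r : List Int)
    (t : List (List Char)), k ≤ W.length → (∀ j, j < k → r[j]?.getD 0 = 0) →
    knapSackLoop (W.take k) S r t = altLoop W k S r t.flatten := by
  induction k with
  | zero =>
    intro W S r t _ _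
    rw [knapSackLoop]
    simp [altLoop]
  | succ i ih =>
    intro W S r t hk hz
    have hi' : i < W.length := by omega
    have hzi : r[i]?.getD 0 = 0 := hz i (Nat.lt_succ_self i)
    have hget' : (W.take (i+1)).getD i 0 = W.getD i 0 := by
      simp [List.getD, hi']
    have htt' : (W.take (i+1)).take i = W.take i := by simp [List.take_take]
    have hlen : (W.take (i+1)).length = i + 1 := by simp; omega
    rw [knapSackLoop]
    simp only [hlen, Nat.add_sub_cancel, hget', htt']
    split
    · rename_i h0; exact absurd h0 (by omega)
    · split
      · rw [ih W _ _ _ (Nat.le_of_lt hi')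
          (fun j hj => by simp [List.getElem?_set_ne (by omega : i ≠ j)]; exact hz j (by omega))]
        rename_i hc
        simp only [List.getD] at hc
        simp [altLoop, hc, List.getD, List.flatten_append, List.append_assoc]
      · rw [ih W _ _ _ (Nat.le_of_lt hi')
          (fun j hj => by simp [List.getElem?_set_ne (by omega : i ≠ j)]; exact hz j (by omega))]
        rename_i hc
        simp only [List.getD] at hc
        rw [set_zero_self r i hzi]
        simp [altLoop, hc, List.getD, hzi, List.flatten_append, List.append_assoc]

-- ===== VERDICT (by name: the statement is the Claim_ definition above) =====
theorem knapSack_out_spec : Claim_equal_knapSack_out := by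
  intro W S _ _
  unfold Spec_knapSack_out
  simp only [knapSack_out, knapSack_out_alt]
  rw [PySem.List.foldl_append_singleton_eq_map, PySem.List.foldl_append_eq_flatMap]
  have h := knapSackLoop_eq_altLoop W.length W S (List.replicate W.length (0 : Int))
    (["Задача о рюкзаке:\n".toList] ++
      (List.range (W.length - 1)).map (fun i => " ".toList ++ PySem.Int.toChars (W.getD i 0) ++ "*x_".toList ++ istr i ++ " +".toList) ++
      [PySem.Int.toChars (W.getD (W.length - 1) 0) ++ "*x_".toList ++ istr (W.length - 1) ++ " = ".toList ++ PySem.Int.toChars S ++ ['\n']])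
    (le_refl _) (fun j hj => by simp [List.getElem?_replicate, hj])
  rw [List.take_length] at h
  rw [h]
  congr 1
  simp [List.flatten_append, List.flatMap_def, List.append_assoc]
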